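-- pv_equiv track=rewrite | github.com/zhmu/x86box | test/alu.py | my_shr
-- ===== SOURCE A (Python) =====
-- CF = (1 << 0)
--
-- PF = (1 << 2)
--
-- ZF = (1 << 6)
--
-- SF = (1 << 7)
--
-- OF = (1 << 11)
--
-- def must_set_zf(v):
--     return v == 0
--
-- def must_set_sf(v):
--     return (v & 0x80) != 0
--
-- def must_set_pf(v):
--     num_1 = 0
--     for n in range(0, 8):
--         if (v & (1 << n)): num_1 += 1
--     return (num_1 & 1) == 0
--
-- def set_flag(fl, on, flag):
--     if on:
--         fl = fl | flag
--     else: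
--         fl = fl & ~flag
--     return fl
--
-- def set_flags_pzs(v, fl):
--     fl = set_flag(fl, must_set_zf(v), ZF)
--     fl = set_flag(fl, must_set_sf(v), SF)
--     fl = set_flag(fl, must_set_pf(v), PF)
--     return fl
--
-- def my_shr(a, cnt, initial_flags):
--     cnt = cnt & 0x1f
--     if cnt == 0:
--         return (a, initial_flags)
--
--     new_fl = initial_flags & ~CF
--
--     res = a
--     for _ in range(0, cnt):
--         new_fl = set_flag(new_fl, res & 1, CF)
--         res = (res >> 1) & 0xff
--
--     if cnt == 1:
--         new_fl = set_flag(new_fl, a & 0x80, OF)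
--     else:
--         # OF is undefined, but does not seem to get set
--         pass
--
--     return (res, set_flags_pzs(res, new_fl))
-- ===== SOURCE B (Python) =====
-- CF = (1 << 0)
--
-- PF = (1 << 2)
--
-- ZF = (1 << 6)
--
-- SF = (1 << 7)
--
-- OF = (1 << 11)
--
-- def set_flag(fl, on, flag):
--     if on:
--         fl = fl | flag
--     else:
--         fl = fl & ~flag
--     return fl
--
-- def set_flags_pzs(v, fl):
--     fl = set_flag(fl, v == 0, ZF)
--     fl = set_flag(fl, (v & 0x80) != 0, SF)
--     fl = set_flag(fl, bin(v & 0xff).count('1') % 2 == 0, PF)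
--     return fl
--
-- def my_shr(a, cnt, initial_flags):
--     cnt &= 0x1f
--     if cnt == 0:
--         return (a, initial_flags)
--     # bits 0..8 of a are all that can reach the result or the carry
--     masked = a & 0x1ff
--     res = masked >> cnt
--     new_fl = set_flag(initial_flags, (masked >> (cnt - 1)) & 1, CF)
--     if cnt == 1:
--         new_fl = set_flag(new_fl, a & 0x80, OF)
--     return (res, set_flags_pzs(res, new_fl))
-- ===== Notes on version B (the rewrite author's own statement) =====
-- stated objective: simpler
-- what changed: The per-bit shift loop (which shifts up to 31 times, updating CF each pass) is replaced by a closed form: res = (a & 0x1ff) >> cnt and CF = ((a & 0x1ff) >> (cnt-1)) & 1, with the parity flag computed from a popcount instead of an 8-bit counting loop.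
import Mathlib
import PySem

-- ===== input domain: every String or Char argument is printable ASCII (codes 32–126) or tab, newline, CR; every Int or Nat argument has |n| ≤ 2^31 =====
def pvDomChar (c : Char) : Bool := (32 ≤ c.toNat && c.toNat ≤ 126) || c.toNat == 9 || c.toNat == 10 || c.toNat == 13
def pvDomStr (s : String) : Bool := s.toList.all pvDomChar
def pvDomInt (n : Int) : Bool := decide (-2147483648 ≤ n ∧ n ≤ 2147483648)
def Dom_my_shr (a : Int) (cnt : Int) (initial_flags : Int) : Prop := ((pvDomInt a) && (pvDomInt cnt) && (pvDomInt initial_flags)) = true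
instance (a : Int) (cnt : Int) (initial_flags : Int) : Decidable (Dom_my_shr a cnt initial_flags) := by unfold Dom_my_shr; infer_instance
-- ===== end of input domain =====

-- B replaces A's per-bit shift loop by a closed form on a & 0x1ff (result and carry bit by one shift each); objective: simpler.

-- ===== PORT A =====
-- module constants (shared by both ports, as in the Python module)
def CF : Int := 1 <<< 0
def PF : Int := 1 <<< 2
def ZF : Int := 1 <<< 6
def SF : Int := 1 <<< 7
def OF : Int := 1 <<< 11

def must_set_zf (v : Int) : Bool := v == 0

def must_set_sf (v : Int) : Bool := PySem.Int.band v 0x80 != 0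

def must_set_pf (v : Int) : Bool :=
  let num_1 : Int := (PySem.List.pyRange 0 8 1).foldl
    (fun num_1 n => if PySem.Int.band v ((1 : Int) <<< n.toNat) != 0 then num_1 + 1 else num_1) 0
  PySem.Int.band num_1 1 == 0

-- shared module helper (used verbatim by both Pythons)
def set_flag (fl : Int) (on : Bool) (flag : Int) : Int :=
  if on then PySem.Int.bor fl flag else PySem.Int.band fl (Int.not flag)

def set_flags_pzs (v : Int) (fl : Int) : Int :=
  let fl := set_flag fl (must_set_zf v) ZF
  let fl := set_flag fl (must_set_sf v) SF
  set_flag fl (must_set_pf v) PF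

def my_shr (a : Int) (cnt : Int) (initial_flags : Int) : Int × Int :=
  let cnt := PySem.Int.band cnt 0x1f
  if cnt == 0 then (a, initial_flags)
  else
    let new_fl := PySem.Int.band initial_flags (Int.not CF)
    let st := (PySem.List.pyRange 0 cnt 1).foldl
      (fun (st : Int × Int) _ =>
        (set_flag st.1 (PySem.Int.band st.2 1 != 0) CF, PySem.Int.band (st.2 >>> (1 : Nat)) 0xff))
      (new_fl, a)
    let new_fl := if cnt == 1 then set_flag st.1 (PySem.Int.band a 0x80 != 0) OF else st.1
    (st.2, set_flags_pzs st.2 new_fl)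

-- ===== PORT B =====
def set_flags_pzs_alt (v : Int) (fl : Int) : Int :=
  let fl := set_flag fl (v == 0) ZF
  let fl := set_flag fl (PySem.Int.band v 0x80 != 0) SF
  set_flag fl ((PySem.Int.bitCount (PySem.Int.band v 0xff)) % 2 == 0) PF

def my_shr_alt (a : Int) (cnt : Int) (initial_flags : Int) : Int × Int :=
  let cnt := PySem.Int.band cnt 0x1f
  if cnt == 0 then (a, initial_flags)
  else
    -- cnt ≥ 1 here, so the Nat shifts below are exact for Python's '>>'
    let masked := PySem.Int.band a 0x1ff
    let res := masked >>> cnt.toNat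
    let new_fl := set_flag initial_flags (PySem.Int.band (masked >>> (cnt - 1).toNat) 1 != 0) CF
    let new_fl := if cnt == 1 then set_flag new_fl (PySem.Int.band a 0x80 != 0) OF else new_fl
    (res, set_flags_pzs_alt res new_fl)

-- ===== PRECONDITION & SPEC =====
def Spec_my_shr (a : Int) (cnt : Int) (initial_flags : Int) (out : Int × Int) : Prop := out = my_shr_alt a cnt initial_flags
instance (a : Int) (cnt : Int) (initial_flags : Int) (out : Int × Int) : Decidable (Spec_my_shr a cnt initial_flags out) := by unfold Spec_my_shr; infer_instance

-- ===== CLAIM (what is proved, stated in full; the proofs are below) =====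
def Claim_equal_my_shr : Prop := ∀ (a : Int) (cnt : Int) (initial_flags : Int), Dom_my_shr a cnt initial_flags → Spec_my_shr a cnt initial_flags (my_shr a cnt initial_flags)

-- ===== LEMMAS AND PROOFS =====

theorem nat_or_one (m : Nat) : m ||| 1 = m - m % 2 + 1 := by
  have h2 : (m ||| 1) / 2 = m / 2 := by rw [Nat.or_div_two]; norm_num
  have h1 : (m ||| 1).testBit 0 = true := by rw [Nat.testBit_or]; simp
  simp only [Nat.testBit_zero, decide_eq_true_eq] at h1
  omega

theorem band_31 (a : Int) : PySem.Int.band a 31 = a % 32 := by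
  unfold PySem.Int.band
  split_ifs with h1 h2 h2 <;> try omega
  · rw [show Int.toNat 31 = 2 ^ 5 - 1 from rfl, Nat.and_two_pow_sub_one_eq_mod,
      show (2 ^ 5 : Nat) = 32 from rfl]
    omega
  · rw [show Int.toNat 31 = 2 ^ 5 - 1 from rfl, Nat.and_comm, Nat.and_two_pow_sub_one_eq_mod,
      show (2 ^ 5 : Nat) = 32 from rfl]
    omega

theorem band_255 (a : Int) : PySem.Int.band a 255 = a % 256 := by
  unfold PySem.Int.band
  split_ifs with h1 h2 h2 <;> try omega
  · rw [show Int.toNat 255 = 2 ^ 8 - 1 from rfl, Nat.and_two_pow_sub_one_eq_mod,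
      show (2 ^ 8 : Nat) = 256 from rfl]
    omega
  · rw [show Int.toNat 255 = 2 ^ 8 - 1 from rfl, Nat.and_comm, Nat.and_two_pow_sub_one_eq_mod,
      show (2 ^ 8 : Nat) = 256 from rfl]
    omega

theorem band_511 (a : Int) : PySem.Int.band a 511 = a % 512 := by
  unfold PySem.Int.band
  split_ifs with h1 h2 h2 <;> try omega
  · rw [show Int.toNat 511 = 2 ^ 9 - 1 from rfl, Nat.and_two_pow_sub_one_eq_mod,
      show (2 ^ 9 : Nat) = 512 from rfl]
    omega
  · rw [show Int.toNat 511 = 2 ^ 9 - 1 from rfl, Nat.and_comm, Nat.and_two_pow_sub_one_eq_mod,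
      show (2 ^ 9 : Nat) = 512 from rfl]
    omega

theorem bor_one (a : Int) : PySem.Int.bor a 1 = a - a % 2 + 1 := by
  unfold PySem.Int.bor
  split_ifs with h1 h2 h2 <;> try omega
  · rw [show Int.toNat 1 = 1 from rfl, nat_or_one]; omega
  · rw [show Int.toNat 1 = 1 from rfl, Nat.and_one_is_mod]; omega

theorem band_neg_two (a : Int) : PySem.Int.band a (-2) = a - a % 2 := by
  unfold PySem.Int.band
  split_ifs with h1 h2 h2 <;> try omega
  · rw [show (-(-2 : Int) - 1).toNat = 1 from rfl, Nat.and_one_is_mod]; omega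
  · rw [show (-(-2 : Int) - 1).toNat = 1 from rfl, nat_or_one]; omega

theorem set_flag_CF (fl : Int) (b : Bool) :
    set_flag fl b CF = fl - fl % 2 + (if b then 1 else 0) := by
  have hCF : CF = 1 := by decide
  have hnot : Int.not CF = -2 := by decide
  cases b
  · simp only [set_flag, Bool.false_eq_true, if_false, hnot, band_neg_two]; omega
  · simp only [set_flag, if_true, hCF, bor_one]

theorem int_band_one_cast (x : Int) : PySem.Int.band x 1 = ((x % 512).toNat % 2 : Nat) := by
  rw [PySem.Int.band_one, PySem.Int.mod_eq_emod_of_pos (by norm_num)]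
  omega

theorem if_band_one (x : Int) :
    (if PySem.Int.band x 1 != 0 then (1 : Int) else 0) = ((x % 512).toNat % 2 : Nat) := by
  rw [int_band_one_cast x]
  rcases Nat.mod_two_eq_zero_or_one (x % 512).toNat with h | h <;> simp [h]

theorem shr_lt_256 (t j : Nat) (h : t < 512) : t >>> (j + 1) < 256 := by
  have e1 : t >>> (j + 1) ≤ t >>> 1 := by
    rw [show j + 1 = 1 + j from by omega, Nat.shiftRight_add]
    exact Nat.shiftRight_le _ _
  have e2 : t >>> 1 = t / 2 := by simp [Nat.shiftRight_eq_div_pow]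
  omega

-- the fold body of A's loop, characterised after k+1 iterations
theorem loop_char (k : Nat) (fl x : Int) :
    List.foldl
      (fun (st : Int × Int) _ =>
        (set_flag st.1 (PySem.Int.band st.2 1 != 0) CF, PySem.Int.band (st.2 >>> (1 : Nat)) 0xff))
      (fl, x) (PySem.List.pyRange 0 ((k : Int) + 1) 1)
    = (fl - fl % 2 + ((((x % 512).toNat >>> k) &&& 1 : Nat) : Int),
       (((x % 512).toNat >>> (k + 1) : Nat) : Int)) := by
  induction k generalizing fl x with
  | zero =>
      rw [show ((0 : Nat) : Int) + 1 = 1 from rfl,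
        show PySem.List.pyRange 0 1 1 = [0] from by decide]
      simp only [List.foldl_cons, List.foldl_nil]
      rw [set_flag_CF, if_band_one, Prod.mk.injEq]
      refine ⟨by rw [Nat.shiftRight_zero, Nat.and_one_is_mod], ?_⟩
      rw [Int.shiftRight_eq_div_pow, band_255, Nat.shiftRight_eq_div_pow]
      norm_num
      omega
  | succ k ih =>
      rw [show ((k + 1 : Nat) : Int) + 1 = ((k : Int) + 1) + 1 from by push_cast; ring,
        PySem.List.pyRange_one_succ_right (by omega), List.foldl_append, ih]
      simp only [List.foldl_cons, List.foldl_nil]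
      rw [Prod.mk.injEq]
      have hbit : ((x % 512).toNat >>> k) &&& 1 < 2 := by
        rw [Nat.and_one_is_mod]; omega
      refine ⟨?_, ?_⟩
      · rw [set_flag_CF, if_band_one]
        simp only [Nat.and_one_is_mod] at hbit ⊢
        omega
      · rw [← Int.natCast_shiftRight, band_255]
        rw [Nat.shiftRight_add (x % 512).toNat (k + 1) 1]
        have hs : ((x % 512).toNat >>> (k + 1)) >>> 1 < 256 := by
          rw [← Nat.shiftRight_add]
          exact shr_lt_256 _ _ (by omega)
        rw [Int.emod_eq_of_lt (by positivity) (by exact_mod_cast hs)]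

set_option maxRecDepth 100000 in
theorem pf_eq : ∀ m : Nat, m < 256 →
    must_set_pf (m : Int) = ((PySem.Int.bitCount (PySem.Int.band (m : Int) 0xff)) % 2 == 0) := by
  decide

theorem pzs_eq (m : Nat) (hm : m < 256) (fl : Int) :
    set_flags_pzs (m : Int) fl = set_flags_pzs_alt (m : Int) fl := by
  simp only [set_flags_pzs, set_flags_pzs_alt, must_set_zf, must_set_sf, pf_eq m hm]

-- ===== VERDICT (by name: the statement is the Claim_ definition above) =====
theorem my_shr_spec : Claim_equal_my_shr := by
  intro a cnt ifl _
  unfold Spec_my_shr my_shr my_shr_alt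
  simp only [band_31, band_511]
  by_cases hc : cnt % 32 = 0
  · simp [hc]
  · have hc0 : 0 ≤ cnt % 32 := Int.emod_nonneg cnt (by norm_num)
    obtain ⟨k, hk⟩ : ∃ k : Nat, cnt % 32 = (k : Int) + 1 := ⟨(cnt % 32 - 1).toNat, by omega⟩
    rw [hk]
    have h0 : (((k : Int) + 1) == 0) = false := by
      rw [beq_eq_false_iff_ne]
      omega
    simp only [h0, Bool.false_eq_true, if_false]
    have hnot : Int.not CF = -2 := by decide
    rw [hnot, band_neg_two, loop_char]
    set r : Nat := (a % 512).toNat with hr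
    have har : a % 512 = (r : Int) := by omega
    have hrk : ((k : Int) + 1).toNat = k + 1 := by omega
    have hrk1 : ((k : Int) + 1 - 1).toNat = k := by omega
    rw [har, hrk, hrk1, ← Int.natCast_shiftRight, ← Int.natCast_shiftRight,
      set_flag_CF, if_band_one, Prod.mk.injEq]
    refine ⟨rfl, ?_⟩
    have hres_lt : r >>> (k + 1) < 256 := shr_lt_256 r k (by omega)
    rw [pzs_eq _ hres_lt]
    congr 1
    cases hb : (((k : Int) + 1) == 1) with
    | false =>
        simp only [Bool.false_eq_true, if_false]
        rw [Nat.and_one_is_mod]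
        generalize r >>> k = s
        omega
    | true =>
        simp only [if_true]
        congr 1
        rw [Nat.and_one_is_mod]
        generalize r >>> k = s
        omega
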